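-- pv_equiv track=rewrite | github.com/jub-ecosystem/mictlanx-client | mictlanx/utils/uri.py | _split_routers_and_query
-- ===== SOURCE A (Python) =====
-- from typing import List, Tuple, Dict, Iterable, Optional
--
-- def _split_routers_and_query(rest: str) -> Tuple[str, Optional[str]]:
--     """
--     Split `rest` (after 'mictlanx://') at the *first* occurrence of either '/'
--     or '?' so router list never includes a slash.
--     Returns (routers_part, tail_without_separator_or_None).
--     """
--     i_q = rest.find("?")
--     i_s = rest.find("/")
--     idxs = [i for i in (i_q, i_s) if i != -1]
--     if not idxs:
--         return rest, None
--     i = min(idxs)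
--     return rest[:i], rest[i + 1 :]  # drop the separator
-- ===== SOURCE B (Python) =====
-- def _split_routers_and_query(rest):
--     # Two composed str.partition calls instead of index arithmetic: split at the
--     # first '/', then split that head at the first '?', re-attaching the rest.
--     head, slash, after = rest.partition('/')
--     routers, qmark, query = head.partition('?')
--     if qmark:
--         return routers, query + slash + after
--     if slash:
--         return head, after
--     return rest, None
-- ===== Notes on version B (the rewrite author's own statement) =====
-- stated objective: simpler
-- what changed: Replaced A's two find() index scans, the -1 filter, min() and slicing with two composed str.partition calls (split at first '/', then split that head at first '?') that rebuild the tail by concatenation, with no index arithmetic at all.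
import Mathlib
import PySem

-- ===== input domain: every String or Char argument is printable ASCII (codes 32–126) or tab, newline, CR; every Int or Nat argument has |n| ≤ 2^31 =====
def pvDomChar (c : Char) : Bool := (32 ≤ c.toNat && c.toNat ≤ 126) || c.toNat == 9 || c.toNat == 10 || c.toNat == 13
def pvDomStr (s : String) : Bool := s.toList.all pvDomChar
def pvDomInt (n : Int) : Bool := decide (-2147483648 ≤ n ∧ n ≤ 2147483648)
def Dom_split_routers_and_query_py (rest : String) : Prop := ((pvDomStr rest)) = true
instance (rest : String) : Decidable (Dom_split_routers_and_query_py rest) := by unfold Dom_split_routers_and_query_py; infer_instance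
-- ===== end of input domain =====

-- B replaces A's two find() scans + -1 filter + min() + slicing with two composed
-- str.partition calls and tail reconstruction by concatenation; objective: simpler.

-- ===== PORT A =====
def split_routers_and_query_py (rest : String) : String × Option String :=
  let i_q := PySem.Str.find rest "?"
  let i_s := PySem.Str.find rest "/"
  let idxs := ([i_q, i_s]).filter (fun i => i ≠ -1)
  if idxs = [] then (rest, none)
  else
    match PySem.List.min? idxs (fun x => x) with
    | none => (rest, none)  -- unreachable totality guard: idxs ≠ []
    | some i =>
      (PySem.Str.slice rest none (some i), some (PySem.Str.slice rest (some (i + 1)) none))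

-- ===== PORT B =====
-- str.partition(d) for a one-char separator, over List Char; exact for a
-- single-character separator: (before, separator-found?, after) — the middle
-- component of Python's triple is the separator string itself, rendered here as
-- the Bool 'found' (it is "" or the one-char separator).
def pvPartition (d : Char) : List Char → List Char × Bool × List Char
  | [] => ([], false, [])
  | c :: tl =>
    if c = d then ([], true, tl)
    else
      let r := pvPartition d tl
      (c :: r.1, r.2.1, r.2.2)

def split_routers_and_query_py_alt (rest : String) : String × Option String :=
  let p1 := pvPartition '/' rest.toList
  let head := p1.1; let slash := p1.2.1; let after := p1.2.2
  let p2 := pvPartition '?' head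
  let routers := p2.1; let qmark := p2.2.1; let query := p2.2.2
  if qmark then
    (String.ofList routers, some (String.ofList (query ++ (if slash then ['/'] else []) ++ after)))
  else if slash then (String.ofList head, some (String.ofList after))
  else (rest, none)

-- ===== PRECONDITION & SPEC =====
def Spec_split_routers_and_query_py (rest : String) (out : String × Option String) : Prop := out = split_routers_and_query_py_alt rest
instance (rest : String) (out : String × Option String) : Decidable (Spec_split_routers_and_query_py rest out) := by unfold Spec_split_routers_and_query_py; infer_instance

-- ===== CLAIM (what is proved, stated in full; the proofs are below) =====
def Claim_equal_split_routers_and_query_py : Prop := ∀ (rest : String), Dom_split_routers_and_query_py rest → Spec_split_routers_and_query_py rest (split_routers_and_query_py rest)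

-- ===== LEMMAS AND PROOFS =====

-- proof-only reference: index of the first '/' or '?' in a list
def pvFirstSep : List Char → Option Nat
  | [] => none
  | c :: tl => if c = '/' ∨ c = '?' then some 0 else (pvFirstSep tl).map (· + 1)

theorem pv_prefix_singleton_iff (d : Char) (xs : List Char) : [d] <+: xs ↔ xs.head? = some d := by
  cases xs with
  | nil => simp
  | cons x t => simp [List.cons_prefix_cons, eq_comm]

theorem pv_infix_singleton_iff (d : Char) (xs : List Char) : [d] <:+: xs ↔ d ∈ xs := by
  constructor
  · intro h
    exact h.subset (by simp)
  · intro h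
    obtain ⟨s, t, rfl⟩ := List.append_of_mem h
    exact ⟨s, t, by simp⟩

theorem pv_find_cons (c d : Char) (l : List Char) :
    PySem.Chars.find (c :: l) [d] =
      if c = d then 0
      else if PySem.Chars.find l [d] = -1 then -1
      else PySem.Chars.find l [d] + 1 := by
  by_cases hc : c = d
  · subst hc
    have hin : [c] <:+: (c :: l) := (pv_infix_singleton_iff c _).mpr (by simp)
    have h0 : 0 ≤ PySem.Chars.find (c :: l) [c] := (PySem.Chars.find_nonneg_iff _ _).mpr hin
    have hs := PySem.Chars.find_spec h0
    have hp : [c] <+: (c :: l).drop 0 := by simp [pv_prefix_singleton_iff c (c :: l)]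
    have ht : (PySem.Chars.find (c :: l) [c]).toNat = 0 := by
      by_contra hne
      exact hs.2 0 (Nat.pos_of_ne_zero hne) hp
    rw [if_pos rfl]
    omega
  · by_cases h1 : PySem.Chars.find l [d] = -1
    · have hnot : ¬ [d] <:+: l := (PySem.Chars.find_eq_neg_one_iff _ _).mp h1
      have hnot2 : ¬ [d] <:+: (c :: l) := by
        rw [pv_infix_singleton_iff] at hnot ⊢
        intro h
        rcases List.mem_cons.mp h with h | h
        · exact hc h.symm
        · exact hnot h
      simp [hc, h1, (PySem.Chars.find_eq_neg_one_iff _ _).mpr hnot2]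
    · have hf0 : 0 ≤ PySem.Chars.find l [d] := by
        have := PySem.Chars.neg_one_le_find l [d]
        omega
      have hsl := PySem.Chars.find_spec hf0
      have hmem : d ∈ l := by
        have h := (pv_prefix_singleton_iff _ _).mp hsl.1
        rw [List.head?_drop] at h
        exact List.mem_of_getElem? h
      have hin : [d] <:+: (c :: l) := (pv_infix_singleton_iff _ _).mpr (List.mem_cons_of_mem _ hmem)
      have hg0 : 0 ≤ PySem.Chars.find (c :: l) [d] := (PySem.Chars.find_nonneg_iff _ _).mpr hin
      have hsg := PySem.Chars.find_spec hg0
      have hgne : (PySem.Chars.find (c :: l) [d]).toNat ≠ 0 := by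
        intro h0
        have hp := hsg.1
        rw [h0] at hp
        have := (pv_prefix_singleton_iff _ _).mp hp
        simp at this
        exact hc this
      have hup : [d] <+: (c :: l).drop ((PySem.Chars.find l [d]).toNat + 1) := by
        simpa using hsl.1
      have hle : (PySem.Chars.find (c :: l) [d]).toNat ≤ (PySem.Chars.find l [d]).toNat + 1 := by
        by_contra hlt
        exact hsg.2 ((PySem.Chars.find l [d]).toNat + 1) (by omega) hup
      have hlow : (PySem.Chars.find l [d]).toNat + 1 ≤ (PySem.Chars.find (c :: l) [d]).toNat := by
        by_contra hlt
        have hk : [d] <+: l.drop ((PySem.Chars.find (c :: l) [d]).toNat - 1) := by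
          have hp := hsg.1
          obtain ⟨k, hk⟩ := Nat.exists_eq_succ_of_ne_zero hgne
          rw [hk] at hp
          simpa [hk] using hp
        exact hsl.2 ((PySem.Chars.find (c :: l) [d]).toNat - 1) (by omega) hk
      simp only [if_neg hc, if_neg h1]
      omega

theorem pv_min1 (a : Int) : PySem.List.min? [a] (fun x => x) = some a := by
  simp [PySem.List.min?]

theorem pv_min2 (a b : Int) :
    PySem.List.min? [a, b] (fun x => x) = some (if b < a then b else a) := by
  simp [PySem.List.min?]
  split <;> rfl

theorem pv_main (l : List Char) :
    (pvFirstSep l = none → PySem.Chars.find l ['?'] = -1 ∧ PySem.Chars.find l ['/'] = -1) ∧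
    (∀ i : Nat, pvFirstSep l = some i →
      (([PySem.Chars.find l ['?'], PySem.Chars.find l ['/']].filter (fun x => x ≠ -1)) ≠ [] ∧
       PySem.List.min? (([PySem.Chars.find l ['?'], PySem.Chars.find l ['/']].filter (fun x => x ≠ -1))) (fun x => x) = some (i : Int))) := by
  induction l with
  | nil =>
    refine ⟨fun _ => ⟨by decide, by decide⟩, fun i h => by simp [pvFirstSep] at h⟩
  | cons c tl ih =>
    have hq := pv_find_cons c '?' tl
    have hs := pv_find_cons c '/' tl
    by_cases hsep : c = '/' ∨ c = '?'
    · have hfs : pvFirstSep (c :: tl) = some 0 := by simp [pvFirstSep, hsep]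
      refine ⟨fun h => by simp [hfs] at h, fun i h => ?_⟩
      rw [hfs] at h
      have hi : i = 0 := by simpa using h.symm
      subst hi
      rcases hsep with hcs | hcq
      · -- c = '/'
        have hcne : c ≠ '?' := by rw [hcs]; decide
        rw [if_neg hcne] at hq
        rw [if_pos hcs] at hs
        by_cases h1 : PySem.Chars.find tl ['?'] = -1
        · rw [if_pos h1] at hq
          refine ⟨by simp [hq, hs], ?_⟩
          simp [hq, hs, pv_min1]
        · rw [if_neg h1] at hq
          have hnn : 0 ≤ PySem.Chars.find tl ['?'] := by
            have := PySem.Chars.neg_one_le_find tl ['?']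
            omega
          refine ⟨by simp [hq, hs], ?_⟩
          rw [hq, hs]
          have hne1 : PySem.Chars.find tl ['?'] + 1 ≠ -1 := by omega
          rw [show (List.filter (fun x => decide (x ≠ -1)) [PySem.Chars.find tl ['?'] + 1, (0:Int)]) = [PySem.Chars.find tl ['?'] + 1, (0:Int)] from by simp [hne1]]
          rw [pv_min2]
          simp
          omega
      · -- c = '?'
        rw [if_pos hcq] at hq
        have hcne : c ≠ '/' := by rw [hcq]; decide
        rw [if_neg hcne] at hs
        by_cases h1 : PySem.Chars.find tl ['/'] = -1
        · rw [if_pos h1] at hs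
          refine ⟨by simp [hq, hs], ?_⟩
          simp [hq, hs, pv_min1]
        · rw [if_neg h1] at hs
          have hnn : 0 ≤ PySem.Chars.find tl ['/'] := by
            have := PySem.Chars.neg_one_le_find tl ['/']
            omega
          refine ⟨by simp [hq, hs], ?_⟩
          rw [hq, hs]
          have hne1 : PySem.Chars.find tl ['/'] + 1 ≠ -1 := by omega
          rw [show (List.filter (fun x => decide (x ≠ -1)) [(0:Int), PySem.Chars.find tl ['/'] + 1]) = [(0:Int), PySem.Chars.find tl ['/'] + 1] from by simp [hne1]]
          rw [pv_min2]
          simp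
          omega
    · -- c is not a separator
      have hcq : c ≠ '?' := fun h => hsep (Or.inr h)
      have hcs : c ≠ '/' := fun h => hsep (Or.inl h)
      rw [if_neg hcq] at hq
      rw [if_neg hcs] at hs
      have hfs : pvFirstSep (c :: tl) = (pvFirstSep tl).map (· + 1) := by
        simp [pvFirstSep, hsep]
      cases htl : pvFirstSep tl with
      | none =>
        obtain ⟨h1, h2⟩ := ih.1 htl
        rw [h1] at hq
        rw [h2] at hs
        norm_num at hq hs
        refine ⟨fun _ => ⟨hq, hs⟩, fun i h => ?_⟩
        rw [hfs, htl] at h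
        simp at h
      | some j =>
        obtain ⟨hne, hmin⟩ := ih.2 j htl
        refine ⟨fun h => by rw [hfs, htl] at h; simp at h, fun i h => ?_⟩
        rw [hfs, htl] at h
        have hi : i = j + 1 := by simpa using h.symm
        subst hi
        by_cases h1 : PySem.Chars.find tl ['?'] = -1
        · rw [if_pos h1] at hq
          by_cases h2 : PySem.Chars.find tl ['/'] = -1
          · rw [if_pos h2] at hs
            exfalso
            apply hne
            simp [h1, h2]
          · rw [if_neg h2] at hs
            rw [show (List.filter (fun x => decide (x ≠ -1)) [PySem.Chars.find tl ['?'], PySem.Chars.find tl ['/']]) = [PySem.Chars.find tl ['/']] from by simp [h1, h2]] at hmin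
            rw [pv_min1] at hmin
            have hj : PySem.Chars.find tl ['/'] = (j : Int) := by simpa using hmin
            have hne2 : PySem.Chars.find tl ['/'] + 1 ≠ -1 := by omega
            rw [hq, hs]
            constructor
            · simp [hne2]
            · rw [show (List.filter (fun x => decide (x ≠ -1)) [(-1 : Int), PySem.Chars.find tl ['/'] + 1]) = [PySem.Chars.find tl ['/'] + 1] from by simp [hne2]]
              rw [pv_min1, hj]
              simp
        · rw [if_neg h1] at hq
          have hnnq : 0 ≤ PySem.Chars.find tl ['?'] := by
            have := PySem.Chars.neg_one_le_find tl ['?']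
            omega
          have hneq : PySem.Chars.find tl ['?'] + 1 ≠ -1 := by omega
          by_cases h2 : PySem.Chars.find tl ['/'] = -1
          · rw [if_pos h2] at hs
            rw [show (List.filter (fun x => decide (x ≠ -1)) [PySem.Chars.find tl ['?'], PySem.Chars.find tl ['/']]) = [PySem.Chars.find tl ['?']] from by simp [h1, h2]] at hmin
            rw [pv_min1] at hmin
            have hj : PySem.Chars.find tl ['?'] = (j : Int) := by simpa using hmin
            rw [hq, hs]
            constructor
            · simp [hneq]
            · rw [show (List.filter (fun x => decide (x ≠ -1)) [PySem.Chars.find tl ['?'] + 1, (-1 : Int)]) = [PySem.Chars.find tl ['?'] + 1] from by simp [hneq]]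
              rw [pv_min1, hj]
              simp
          · rw [if_neg h2] at hs
            have hnns : 0 ≤ PySem.Chars.find tl ['/'] := by
              have := PySem.Chars.neg_one_le_find tl ['/']
              omega
            have hnes : PySem.Chars.find tl ['/'] + 1 ≠ -1 := by omega
            rw [show (List.filter (fun x => decide (x ≠ -1)) [PySem.Chars.find tl ['?'], PySem.Chars.find tl ['/']]) = [PySem.Chars.find tl ['?'], PySem.Chars.find tl ['/']] from by simp [h1, h2]] at hmin
            rw [pv_min2] at hmin
            rw [hq, hs]
            constructor
            · simp [hneq]
            · rw [show (List.filter (fun x => decide (x ≠ -1)) [PySem.Chars.find tl ['?'] + 1, PySem.Chars.find tl ['/'] + 1]) = [PySem.Chars.find tl ['?'] + 1, PySem.Chars.find tl ['/'] + 1] from by simp [hneq, hnes]]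
              rw [pv_min2]
              have := hmin
              split at this <;> split <;> simp_all <;> omega

theorem pv_toList_q : ("?" : String).toList = ['?'] := rfl
theorem pv_toList_s : ("/" : String).toList = ['/'] := rfl

-- list-level core of B
def pvBcore (l : List Char) : List Char × Option (List Char) :=
  let p1 := pvPartition '/' l
  let p2 := pvPartition '?' p1.1
  if p2.2.1 then (p2.1, some (p2.2.2 ++ (if p1.2.1 then ['/'] else []) ++ p1.2.2))
  else if p1.2.1 then (p1.1, some p1.2.2)
  else (l, none)

theorem pv_partition_recon (d : Char) (l : List Char) :
    (pvPartition d l).1 ++ (if (pvPartition d l).2.1 then [d] else []) ++ (pvPartition d l).2.2 = l := by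
  induction l with
  | nil => simp [pvPartition]
  | cons c tl ih =>
    by_cases h : c = d
    · subst h; simp [pvPartition]
    · simp [pvPartition, h, ih]

-- B's core equals the first-separator characterisation
theorem pv_bcore_eq (l : List Char) :
    pvBcore l = match pvFirstSep l with
      | none => (l, none)
      | some i => (l.take i, some (l.drop (i + 1))) := by
  induction l with
  | nil => simp [pvBcore, pvPartition, pvFirstSep]
  | cons c tl ih =>
    by_cases hcs : c = '/'
    · subst hcs
      simp [pvBcore, pvPartition, pvFirstSep]
    · by_cases hcq : c = '?'
      · subst hcq
        have hrec := pv_partition_recon '/' tl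
        simp only [pvBcore, pvPartition, if_neg (by decide : ¬ ('?' : Char) = '/'), pvFirstSep]
        simp [hrec]
      · have hsep : ¬ (c = '/' ∨ c = '?') := by tauto
        have hfs : pvFirstSep (c :: tl) = (pvFirstSep tl).map (· + 1) := by
          simp [pvFirstSep, hsep]
        simp only [pvBcore, pvPartition, if_neg hcs] at *
        simp only [if_neg hcq] at *
        cases htl : pvFirstSep tl with
        | none =>
          rw [htl] at ih
          rw [hfs, htl]
          simp only [Option.map_none]
          split at ih
          · simp_all
          · split at ih
            · simp_all
            · simp_all
        | some j =>
          rw [htl] at ih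
          rw [hfs, htl]
          simp only [Option.map_some]
          split at ih
          · rename_i hq
            simp only [hq, if_pos]
            simp only [Prod.mk.injEq, Option.some.injEq] at ih
            simp [ih.1, ih.2, List.take_succ_cons, List.drop_succ_cons]
          · rename_i hq
            split at ih
            · rename_i hsl
              simp only [hq, if_neg, Bool.false_eq_true, not_false_iff, hsl, if_pos]
              simp only [Prod.mk.injEq, Option.some.injEq] at ih
              simp [ih.1, ih.2, List.take_succ_cons, List.drop_succ_cons]
            · simp_all

-- ===== VERDICT (by name: the statement is the Claim_ definition above) =====
theorem split_routers_and_query_py_spec : Claim_equal_split_routers_and_query_py := by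
  intro rest _
  unfold Spec_split_routers_and_query_py
  unfold split_routers_and_query_py split_routers_and_query_py_alt
  simp only [PySem.Str.find_eq, pv_toList_q, pv_toList_s]
  have hb := pv_bcore_eq rest.toList
  simp only [pvBcore] at hb
  cases hfs : pvFirstSep rest.toList with
  | none =>
    obtain ⟨hq, hs⟩ := (pv_main rest.toList).1 hfs
    rw [hfs] at hb
    simp only at hb
    simp only [hq, hs]
    rw [show (List.filter (fun x => decide (x ≠ -1)) [(-1 : Int), (-1 : Int)]) = ([] : List Int) from by decide]
    rw [if_pos rfl]
    -- B side: show alt = (rest, none) via hb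
    split at hb
    · simp at hb
    · split at hb
      · simp at hb
      · rename_i hq2 hs2
        simp [hq2, hs2]
  | some i =>
    obtain ⟨hne, hmin⟩ := (pv_main rest.toList).2 i hfs
    rw [if_neg hne, hmin]
    rw [hfs] at hb
    simp only at hb
    -- rewrite B's branches using hb
    split at hb <;> [skip; split at hb]
    · rename_i hq2
      simp only [Prod.mk.injEq, Option.some.injEq] at hb
      simp only [hq2, if_pos]
      refine Prod.ext ?_ ?_
      · apply String.ext
        rw [PySem.Str.toList_slice]
        simp only [PySem.Chars.slice_eq_listSlice]
        rw [PySem.List.slice_to_natCast]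
        simp [hb.1]
      · simp only
        congr 1
        apply String.ext
        rw [PySem.Str.toList_slice]
        simp only [PySem.Chars.slice_eq_listSlice]
        rw [show ((i : Int) + 1) = ((i + 1 : Nat) : Int) from by push_cast; ring]
        rw [PySem.List.slice_from_natCast]
        simp [hb.2]
    · rename_i hq2 hs2
      simp only [Prod.mk.injEq, Option.some.injEq] at hb
      simp only [hq2, Bool.false_eq_true, if_neg, not_false_iff, hs2, if_pos]
      refine Prod.ext ?_ ?_
      · apply String.ext
        rw [PySem.Str.toList_slice]
        simp only [PySem.Chars.slice_eq_listSlice]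
        rw [PySem.List.slice_to_natCast]
        simp [hb.1]
      · simp only
        congr 1
        apply String.ext
        rw [PySem.Str.toList_slice]
        simp only [PySem.Chars.slice_eq_listSlice]
        rw [show ((i : Int) + 1) = ((i + 1 : Nat) : Int) from by push_cast; ring]
        rw [PySem.List.slice_from_natCast]
        simp [hb.2]
    · simp at hb
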